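-- pv_equiv track=rewrite | github.com/nrizvi/sample_scripts | sankey_chart.py | return_nums
-- ===== SOURCE A (Python) =====
-- def return_nums(dict1, dict2, dict3):
--     new_dict = {}
--     for k,v in dict1.items():
--         for i,j in dict2.items():
--             if k == i:
--                 for b,c in dict3.items():
--                     if v == b:
--                         new_dict[j] = c
--     return new_dict
-- ===== SOURCE B (Python) =====
-- def return_nums(dict1, dict2, dict3):
--     # Direct dict lookups instead of A's triple nested scan.
--     return {dict2[k]: dict3[v] for k, v in dict1.items() if k in dict2 and v in dict3}
-- ===== Notes on version B (the rewrite author's own statement) =====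
-- stated objective: faster
-- what changed: Replaces the triple nested scan over dict2 and dict3 with a single dict comprehension using direct dict membership/lookup for each item of dict1.
import Mathlib
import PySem

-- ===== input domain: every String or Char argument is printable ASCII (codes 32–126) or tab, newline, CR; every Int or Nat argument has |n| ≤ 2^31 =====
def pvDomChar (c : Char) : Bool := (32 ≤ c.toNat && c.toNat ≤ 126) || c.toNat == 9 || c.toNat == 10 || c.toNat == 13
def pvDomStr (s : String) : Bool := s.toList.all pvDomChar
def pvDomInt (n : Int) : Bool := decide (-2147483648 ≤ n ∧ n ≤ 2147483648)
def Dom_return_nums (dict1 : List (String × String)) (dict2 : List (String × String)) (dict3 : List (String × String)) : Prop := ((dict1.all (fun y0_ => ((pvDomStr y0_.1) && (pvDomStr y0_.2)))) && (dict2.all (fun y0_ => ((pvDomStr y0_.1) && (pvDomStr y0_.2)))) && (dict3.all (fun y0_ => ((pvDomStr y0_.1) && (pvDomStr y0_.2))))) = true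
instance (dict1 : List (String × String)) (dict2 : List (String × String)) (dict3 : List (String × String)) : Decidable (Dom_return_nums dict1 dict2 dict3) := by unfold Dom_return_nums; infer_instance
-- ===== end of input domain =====

-- B replaces A's triple nested scan by direct first-match dict lookups (asymptotically faster in Python).

-- ===== PORT A =====
-- literal transliteration of A: three nested loops over the items, building new_dict
def return_nums (dict1 : List (String × String)) (dict2 : List (String × String)) (dict3 : List (String × String)) : List (String × String) :=
  (dict1.foldl (fun nd kv =>
      dict2.foldl (fun nd ij =>
          if kv.1 == ij.1 then
            dict3.foldl (fun nd bc =>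
                if kv.2 == bc.1 then nd.insert ij.2 bc.2 else nd) nd
          else nd) nd)
    (PySem.Dict.empty : PySem.Dict String String)).items

-- ===== PORT B =====
-- transliteration of B: one pass over dict1, direct dict lookups in dict2 and dict3
def return_nums_alt (dict1 : List (String × String)) (dict2 : List (String × String)) (dict3 : List (String × String)) : List (String × String) :=
  (dict1.foldl (fun nd kv =>
      match (PySem.Dict.mk dict2).get? kv.1, (PySem.Dict.mk dict3).get? kv.2 with
      | some j, some c => nd.insert j c
      | _, _ => nd)
    (PySem.Dict.empty : PySem.Dict String String)).items

-- ===== PRECONDITION & SPEC =====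
-- Pre_ excludes only association lists with duplicate keys in dict2 or dict3: those do not
-- encode any Python dict (every Python input to A has unique keys), so A is never run on them.
def Pre_return_nums (dict1 : List (String × String)) (dict2 : List (String × String)) (dict3 : List (String × String)) : Prop :=
  (dict2.map Prod.fst).Nodup ∧ (dict3.map Prod.fst).Nodup
instance (dict1 : List (String × String)) (dict2 : List (String × String)) (dict3 : List (String × String)) : Decidable (Pre_return_nums dict1 dict2 dict3) := by unfold Pre_return_nums; infer_instance

def pvWitness_return_nums : (List (String × String)) × (List (String × String)) × (List (String × String)) :=
  ([("a", "x"), ("b", "y")], [("a", "p"), ("b", "q")], [("x", "1"), ("z", "2")])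

def Spec_return_nums (dict1 : List (String × String)) (dict2 : List (String × String)) (dict3 : List (String × String)) (out : List (String × String)) : Prop := out = return_nums_alt dict1 dict2 dict3
instance (dict1 : List (String × String)) (dict2 : List (String × String)) (dict3 : List (String × String)) (out : List (String × String)) : Decidable (Spec_return_nums dict1 dict2 dict3 out) := by unfold Spec_return_nums; infer_instance

-- ===== CLAIM (what is proved, stated in full; the proofs are below) =====
def Claim_equal_return_nums : Prop := ∀ (dict1 : List (String × String)) (dict2 : List (String × String)) (dict3 : List (String × String)), Dom_return_nums dict1 dict2 dict3 → Pre_return_nums dict1 dict2 dict3 → Spec_return_nums dict1 dict2 dict3 (return_nums dict1 dict2 dict3)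

-- ===== LEMMAS AND PROOFS =====

-- a guarded fold over a list containing no match of k leaves the accumulator unchanged
theorem foldl_guard_no_match {β : Type} (l : List (String × String)) (k : String)
    (f : β → String → β) (acc : β) (h : ∀ p ∈ l, p.1 ≠ k) :
    l.foldl (fun nd p => if k == p.1 then f nd p.2 else nd) acc = acc := by
  induction l generalizing acc with
  | nil => rfl
  | cons p t ih =>
      have hp : (k == p.1) = false := by
        simp only [beq_eq_false_iff_ne]
        exact fun hh => h p List.mem_cons_self hh.symm
      simp only [List.foldl_cons, hp, Bool.false_eq_true, if_false]
      exact ih acc (fun q hq => h q (List.mem_cons_of_mem _ hq))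

-- with unique keys, a guarded fold is exactly one application at the first-match lookup
theorem foldl_guard_first_match {β : Type} (l : List (String × String)) (k : String)
    (f : β → String → β) (acc : β) (h : (l.map Prod.fst).Nodup) :
    l.foldl (fun nd p => if k == p.1 then f nd p.2 else nd) acc =
      match (PySem.Dict.mk l).get? k with
      | some v => f acc v
      | none => acc := by
  induction l generalizing acc with
  | nil => rfl
  | cons p t ih =>
      simp only [List.map_cons, List.nodup_cons] at h
      obtain ⟨hp, ht⟩ := h
      rcases p with ⟨a, b⟩
      simp only [List.foldl_cons, PySem.Dict.get?_mk_cons]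
      by_cases hk : a = k
      · subst hk
        simp only [beq_self_eq_true, if_true]
        exact foldl_guard_no_match t a f (f acc b)
          (fun q hq hqa => hp ((List.mem_map).2 ⟨q, hq, hqa⟩))
      · have h1 : (k == a) = false := by
          simp only [beq_eq_false_iff_ne]; exact fun hh => hk hh.symm
        have h2 : (a == k) = false := by
          simp only [beq_eq_false_iff_ne]; exact hk
        simp only [h1, h2, Bool.false_eq_true, if_false]
        exact ih acc ht

theorem return_nums_spec : Claim_equal_return_nums := by
  intro dict1 dict2 dict3 _ hpre
  obtain ⟨h2, h3⟩ := hpre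
  unfold Spec_return_nums return_nums return_nums_alt
  congr 1
  have hbody : (fun (nd : PySem.Dict String String) (kv : String × String) =>
      dict2.foldl (fun nd ij =>
          if kv.1 == ij.1 then
            dict3.foldl (fun nd bc =>
                if kv.2 == bc.1 then nd.insert ij.2 bc.2 else nd) nd
          else nd) nd) =
      (fun nd kv =>
        match (PySem.Dict.mk dict2).get? kv.1, (PySem.Dict.mk dict3).get? kv.2 with
        | some j, some c => nd.insert j c
        | _, _ => nd) := by
    funext nd kv
    rw [foldl_guard_first_match dict2 kv.1
          (fun nd j => dict3.foldl (fun nd bc =>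
              if kv.2 == bc.1 then nd.insert j bc.2 else nd) nd) nd h2]
    cases hj : (PySem.Dict.mk dict2).get? kv.1 with
    | none => cases (PySem.Dict.mk dict3).get? kv.2 <;> rfl
    | some j =>
        dsimp only
        rw [foldl_guard_first_match dict3 kv.2 (fun nd c => nd.insert j c) nd h3]
        cases (PySem.Dict.mk dict3).get? kv.2 <;> rfl
  rw [hbody]
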